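-- pv_equiv track=rewrite | github.com/SimeonChifligarov/Alpha_Judge_Softuni | Python_Basics/PB_Exams/Programming_Basics_Online_Example_Exam_7/04_Balls_v2_advanced.py | calculate_ball_points
-- ===== SOURCE A (Python) =====
-- def calculate_ball_points(colors):
--     points = 0
--     color_counts = {
--         'red': 0,
--         'orange': 0,
--         'yellow': 0,
--         'white': 0,
--         'black': 0,
--         'other': 0,
--     }
--     point_values = {
--         'red': 5,
--         'orange': 10,
--         'yellow': 15,
--         'white': 20,
--     }
--     black_divides = 0
--
--     for color in colors:
--         if color in point_values:
--             points += point_values[color]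
--             color_counts[color] += 1
--         elif color == 'black':
--             points //= 2
--             black_divides += 1
--             color_counts['black'] += 1
--         else:
--             color_counts['other'] += 1
--
--     result = (
--         f'Total points: {points}',
--         f'Red balls: {color_counts["red"]}',
--         f'Orange balls: {color_counts["orange"]}',
--         f'Yellow balls: {color_counts["yellow"]}',
--         f'White balls: {color_counts["white"]}',
--         f'Other colors picked: {color_counts["other"]}',
--         f'Divides from black balls: {black_divides}',
--     )
--     return result
-- ===== SOURCE B (Python) =====
-- def calculate_ball_points(colors):
--     colors = list(colors)
--     vals = {'red': 5, 'orange': 10, 'yellow': 15, 'white': 20}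
--     # Split the draw sequence at each 'black' ball into segments; each segment
--     # is reduced to its point sum, then the total is a halving fold:
--     # points = (...((s0 // 2? no: s0) // 2 + s1) // 2 + s2 ...) — each black
--     # halves everything drawn before it.  Starting the fold from 0 is harmless
--     # since 0 // 2 + s0 == s0.
--     segs = [0]
--     for c in colors:
--         if c == 'black':
--             segs.append(0)
--         else:
--             segs[-1] += vals.get(c, 0)
--     points = 0
--     for s in segs:
--         points = points // 2 + s
--     red = colors.count('red')
--     orange = colors.count('orange')
--     yellow = colors.count('yellow')
--     white = colors.count('white')
--     black = len(segs) - 1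
--     other = len(colors) - (red + orange + yellow + white + black)
--     return (
--         f'Total points: {points}',
--         f'Red balls: {red}',
--         f'Orange balls: {orange}',
--         f'Yellow balls: {yellow}',
--         f'White balls: {white}',
--         f'Other colors picked: {other}',
--         f'Divides from black balls: {black}',
--     )
-- ===== Notes on version B (the rewrite author's own statement) =====
-- stated objective: alternative
-- what changed: B replaces A's single stateful loop (running points, a pre-keyed counts dict, a black_divides counter) by a split-and-fold: the sequence is split at each 'black' into per-segment point sums, the total is a halving fold over those segment sums, and the five counts come from list.count / len(segs)-1 with other = len - their sum.
import Mathlib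
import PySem

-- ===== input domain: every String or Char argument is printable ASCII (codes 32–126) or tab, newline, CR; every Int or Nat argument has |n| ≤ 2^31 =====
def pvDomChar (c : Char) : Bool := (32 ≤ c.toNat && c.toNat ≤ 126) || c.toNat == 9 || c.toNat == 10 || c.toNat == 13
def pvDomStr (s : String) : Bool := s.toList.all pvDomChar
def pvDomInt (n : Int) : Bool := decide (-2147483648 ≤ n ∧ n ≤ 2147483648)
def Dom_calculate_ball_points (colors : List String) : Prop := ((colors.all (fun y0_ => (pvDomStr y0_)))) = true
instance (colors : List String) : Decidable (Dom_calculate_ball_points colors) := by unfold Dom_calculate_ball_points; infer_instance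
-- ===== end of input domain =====

-- B replaces A's single stateful loop by a split-and-fold: split the sequence at each
-- 'black' into per-segment point sums, total = halving fold over the segments; counts
-- come from list.count and len(segs)-1 (alternative decomposition, same return value).

-- ===== PORT A =====
def pvVals : PySem.Dict String Int :=
  PySem.Dict.ofList [("red", 5), ("orange", 10), ("yellow", 15), ("white", 20)]

def pvInitCounts : PySem.Dict String Int :=
  PySem.Dict.ofList [("red", 0), ("orange", 0), ("yellow", 0), ("white", 0), ("black", 0), ("other", 0)]

def pvStepA (st : Int × PySem.Dict String Int × Int) (color : String) :
    Int × PySem.Dict String Int × Int :=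
  if pvVals.contains color then
    (st.1 + pvVals.getD color 0, st.2.1.modify color 0 (· + 1), st.2.2)
  else if color == "black" then
    (PySem.Int.floordiv st.1 2, st.2.1.modify "black" 0 (· + 1), st.2.2 + 1)
  else
    (st.1, st.2.1.modify "other" 0 (· + 1), st.2.2)

def calculate_ball_points (colors : List String) : List String :=
  let st := colors.foldl pvStepA (0, pvInitCounts, 0)
  ["Total points: " ++ PySem.Int.toStr st.1,
   "Red balls: " ++ PySem.Int.toStr (st.2.1.getD "red" 0),
   "Orange balls: " ++ PySem.Int.toStr (st.2.1.getD "orange" 0),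
   "Yellow balls: " ++ PySem.Int.toStr (st.2.1.getD "yellow" 0),
   "White balls: " ++ PySem.Int.toStr (st.2.1.getD "white" 0),
   "Other colors picked: " ++ PySem.Int.toStr (st.2.1.getD "other" 0),
   "Divides from black balls: " ++ PySem.Int.toStr st.2.2]

-- ===== PORT B =====
def pvValsB : PySem.Dict String Int :=
  PySem.Dict.ofList [("red", 5), ("orange", 10), ("yellow", 15), ("white", 20)]

-- segs is kept as (finished segments, last segment); Python's segs = st.1 ++ [st.2]
def pvSegStep (st : List Int × Int) (c : String) : List Int × Int :=
  if c == "black" then (st.1 ++ [st.2], 0) else (st.1, st.2 + pvValsB.getD c 0)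

def calculate_ball_points_alt (colors : List String) : List String :=
  let st := colors.foldl pvSegStep ([], 0)
  let segs := st.1 ++ [st.2]
  let points := segs.foldl (fun p s => PySem.Int.floordiv p 2 + s) 0
  let red := (PySem.List.count colors "red" : Int)
  let orange := (PySem.List.count colors "orange" : Int)
  let yellow := (PySem.List.count colors "yellow" : Int)
  let white := (PySem.List.count colors "white" : Int)
  let black := (segs.length : Int) - 1
  let other := (colors.length : Int) - (red + orange + yellow + white + black)
  ["Total points: " ++ PySem.Int.toStr points,
   "Red balls: " ++ PySem.Int.toStr red,
   "Orange balls: " ++ PySem.Int.toStr orange,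
   "Yellow balls: " ++ PySem.Int.toStr yellow,
   "White balls: " ++ PySem.Int.toStr white,
   "Other colors picked: " ++ PySem.Int.toStr other,
   "Divides from black balls: " ++ PySem.Int.toStr black]

-- ===== PRECONDITION & SPEC =====
def Spec_calculate_ball_points (colors : List String) (out : List String) : Prop := out = calculate_ball_points_alt colors
instance (colors : List String) (out : List String) : Decidable (Spec_calculate_ball_points colors out) := by unfold Spec_calculate_ball_points; infer_instance

-- ===== CLAIM (what is proved, stated in full; the proofs are below) =====
def Claim_equal_calculate_ball_points : Prop := ∀ (colors : List String), Dom_calculate_ball_points colors → Spec_calculate_ball_points colors (calculate_ball_points colors)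

-- ===== LEMMAS AND PROOFS =====

-- value of a single step of A's points accumulator
def pvStepPoints (p : Int) (c : String) : Int :=
  if c == "black" then PySem.Int.floordiv p 2 else p + pvValsB.getD c 0

-- key that A's single loop bumps for a given color
def pvKeyOf (c : String) : String :=
  if pvVals.contains c then c else if c == "black" then "black" else "other"

-- B's halving fold over a segment list
def pvSegFold (l : List Int) : Int :=
  l.foldl (fun p s => PySem.Int.floordiv p 2 + s) 0

lemma pvVals_get? (c : String) : pvVals.get? c =
    if c = "red" then some 5 else if c = "orange" then some 10
    else if c = "yellow" then some 15 else if c = "white" then some 20 else none := by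
  by_cases h1 : c = "red"; · subst h1; rfl
  by_cases h2 : c = "orange"; · subst h2; rfl
  by_cases h3 : c = "yellow"; · subst h3; rfl
  by_cases h4 : c = "white"; · subst h4; rfl
  have hmk : pvVals = PySem.Dict.mk [("red", 5), ("orange", 10), ("yellow", 15), ("white", 20)] := rfl
  rw [hmk]
  have e1 : ("red" == c) = false := beq_eq_false_iff_ne.mpr (Ne.symm h1)
  have e2 : ("orange" == c) = false := beq_eq_false_iff_ne.mpr (Ne.symm h2)
  have e3 : ("yellow" == c) = false := beq_eq_false_iff_ne.mpr (Ne.symm h3)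
  have e4 : ("white" == c) = false := beq_eq_false_iff_ne.mpr (Ne.symm h4)
  simp [PySem.Dict.get?, List.find?, h1, h2, h3, h4, e1, e2, e3, e4]

lemma pvVals_contains (c : String) : pvVals.contains c =
    (c == "red" || c == "orange" || c == "yellow" || c == "white") := by
  rw [PySem.Dict.contains_eq_isSome_get?, pvVals_get?]
  split_ifs <;> simp_all

lemma pvVals_getD (c : String) : pvVals.getD c 0 =
    if c = "red" then 5 else if c = "orange" then 10
    else if c = "yellow" then 15 else if c = "white" then 20 else 0 := by
  rw [PySem.Dict.getD_eq_get?_getD, pvVals_get?]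
  split_ifs <;> simp

lemma pvStepA_eq (st : Int × PySem.Dict String Int × Int) (c : String) :
    pvStepA st c = (pvStepPoints st.1 c, st.2.1.modify (pvKeyOf c) 0 (· + 1),
      st.2.2 + (if c == "black" then 1 else 0)) := by
  have hB : pvValsB = pvVals := rfl
  unfold pvStepA pvStepPoints pvKeyOf
  rw [hB, pvVals_contains, pvVals_getD]
  by_cases h1 : c = "red"; · subst h1; simp
  by_cases h2 : c = "orange"; · subst h2; simp
  by_cases h3 : c = "yellow"; · subst h3; simp
  by_cases h4 : c = "white"; · subst h4; simp
  by_cases h5 : c = "black"; · subst h5; simp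
  simp [h1, h2, h3, h4, h5]

lemma pvFoldA_split (colors : List String) :
    ∀ (p : Int) (d : PySem.Dict String Int) (b : Int),
    colors.foldl pvStepA (p, d, b) =
      (colors.foldl pvStepPoints p,
       colors.foldl (fun d c => d.modify (pvKeyOf c) 0 (· + 1)) d,
       b + (colors.count "black" : Int)) := by
  induction colors with
  | nil => intro p d b; simp
  | cons c l ih =>
    intro p d b
    simp only [List.foldl_cons, pvStepA_eq, ih, List.count_cons]
    simp only [Prod.mk.injEq]
    refine ⟨trivial, trivial, ?_⟩
    by_cases hb : c = "black"
    · simp [hb]; omega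
    · simp [hb]

lemma pvCounts_fold (l : List String) (k : String) :
    ∀ d : PySem.Dict String Int,
    (l.foldl (fun d c => d.modify (pvKeyOf c) 0 (· + 1)) d).getD k 0 =
      d.getD k 0 + (l.countP (fun c => pvKeyOf c == k) : Int) := by
  induction l with
  | nil => intro d; simp
  | cons c l ih =>
    intro d
    simp only [List.foldl_cons, ih, List.countP_cons]
    rw [PySem.Dict.getD_modify]
    by_cases h : k = pvKeyOf c
    · subst h; simp; ring
    · have h2 : (pvKeyOf c == k) = false := by
        simp only [beq_eq_false_iff_ne, ne_eq]; exact fun e => h e.symm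
      simp [h, h2]

lemma pvKeyOf_eq_self (k : String)
    (hk : k = "red" ∨ k = "orange" ∨ k = "yellow" ∨ k = "white" ∨ k = "black")
    (c : String) : (pvKeyOf c == k) = (c == k) := by
  unfold pvKeyOf
  rw [pvVals_contains]
  by_cases h1 : c = "red"; · subst h1; simp
  by_cases h2 : c = "orange"; · subst h2; simp
  by_cases h3 : c = "yellow"; · subst h3; simp
  by_cases h4 : c = "white"; · subst h4; simp
  by_cases h5 : c = "black"; · subst h5; simp
  have hck : ¬ c = k := by rintro rfl; rcases hk with h|h|h|h|h <;> simp_all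
  have hok : ¬ ("other" = k) := by rcases hk with h|h|h|h|h <;> subst h <;> decide
  simp [h1, h2, h3, h4, h5, hck, hok]

lemma pvCountP_key (k : String)
    (hk : k = "red" ∨ k = "orange" ∨ k = "yellow" ∨ k = "white" ∨ k = "black")
    (l : List String) : l.countP (fun c => pvKeyOf c == k) = l.count k := by
  have : l.countP (fun c => pvKeyOf c == k) = l.countP (fun c => c == k) :=
    List.countP_congr (fun c _ => by rw [pvKeyOf_eq_self k hk])
  rw [this, List.count]

lemma pvCount_other (l : List String) :
    (l.countP (fun c => pvKeyOf c == "other") : Int) =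
      (l.length : Int) - ((l.count "red" : Int) + l.count "orange" + l.count "yellow" +
        l.count "white" + l.count "black") := by
  induction l with
  | nil => simp
  | cons c l ih =>
    simp only [List.countP_cons, List.count_cons, List.length_cons]
    have hkey : (pvKeyOf c == "other") =
        !(c == "red" || c == "orange" || c == "yellow" || c == "white" || c == "black") := by
      unfold pvKeyOf
      rw [pvVals_contains]
      by_cases h1 : c = "red"; · subst h1; simp
      by_cases h2 : c = "orange"; · subst h2; simp
      by_cases h3 : c = "yellow"; · subst h3; simp
      by_cases h4 : c = "white"; · subst h4; simp
      by_cases h5 : c = "black"; · subst h5; simp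
      simp [h1, h2, h3, h4, h5]
    rw [hkey]
    by_cases h1 : c = "red"; · subst h1; simp; push_cast [ih]; ring
    by_cases h2 : c = "orange"; · subst h2; simp; push_cast [ih]; ring
    by_cases h3 : c = "yellow"; · subst h3; simp; push_cast [ih]; ring
    by_cases h4 : c = "white"; · subst h4; simp; push_cast [ih]; ring
    by_cases h5 : c = "black"; · subst h5; simp; push_cast [ih]; ring
    simp only [beq_iff_eq, h1, h2, h3, h4, h5]
    simp [h1, h2, h3, h4, h5]; push_cast [ih]; ring

lemma pvSegFold_append (xs : List Int) (x : Int) :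
    pvSegFold (xs ++ [x]) = PySem.Int.floordiv (pvSegFold xs) 2 + x := by
  simp [pvSegFold, List.foldl_append]

-- B's halving fold over the segments it builds equals A's running-points fold
lemma pvSegPoints (colors : List String) :
    ∀ st : List Int × Int,
    pvSegFold ((colors.foldl pvSegStep st).1 ++ [(colors.foldl pvSegStep st).2]) =
      colors.foldl pvStepPoints (pvSegFold (st.1 ++ [st.2])) := by
  induction colors with
  | nil => intro st; simp
  | cons c l ih =>
    intro st
    simp only [List.foldl_cons, pvSegStep, pvStepPoints]
    by_cases hb : c = "black"
    · simp only [hb, beq_self_eq_true, if_true]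
      rw [ih]
      congr 1
      show pvSegFold ((st.1 ++ [st.2]) ++ [(0:Int)]) = _
      rw [pvSegFold_append]
      ring
    · have hb' : (c == "black") = false := beq_eq_false_iff_ne.mpr hb
      simp only [hb', if_false, Bool.false_eq_true]
      rw [ih]
      congr 1
      show pvSegFold (st.1 ++ [st.2 + pvValsB.getD c 0]) = _
      rw [pvSegFold_append, pvSegFold_append]
      ring

-- the number of finished segments equals the number of blacks seen
lemma pvSegLen (colors : List String) :
    ∀ st : List Int × Int,
    ((colors.foldl pvSegStep st).1).length = st.1.length + colors.count "black" := by
  induction colors with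
  | nil => intro st; simp
  | cons c l ih =>
    intro st
    simp only [List.foldl_cons, pvSegStep, List.count_cons]
    by_cases hb : c = "black"
    · simp [hb, ih]; omega
    · have hb' : (c == "black") = false := beq_eq_false_iff_ne.mpr hb
      simp [hb', ih]

-- ===== VERDICT (by name: the statement is the Claim_ definition above) =====
theorem calculate_ball_points_spec : Claim_equal_calculate_ball_points := by
  intro colors _
  unfold Spec_calculate_ball_points calculate_ball_points calculate_ball_points_alt
  simp only [pvFoldA_split, pvCounts_fold]
  have hpts : ((colors.foldl pvSegStep ([], 0)).1 ++ [(colors.foldl pvSegStep ([], 0)).2]).foldl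
      (fun p s => PySem.Int.floordiv p 2 + s) 0 = colors.foldl pvStepPoints 0 := by
    have := pvSegPoints colors ([], 0)
    simpa [pvSegFold] using this
  have hlen : (((colors.foldl pvSegStep ([], 0)).1 ++ [(colors.foldl pvSegStep ([], 0)).2]).length : Int) - 1
      = (colors.count "black" : Int) := by
    rw [List.length_append, pvSegLen colors ([], 0)]
    simp only [List.length_nil, List.length_cons]
    push_cast
    ring
  rw [hpts, hlen]
  rw [pvCountP_key "red" (by tauto), pvCountP_key "orange" (by tauto),
    pvCountP_key "yellow" (by tauto), pvCountP_key "white" (by tauto)]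
  have i1 : pvInitCounts.getD "red" 0 = 0 := rfl
  have i2 : pvInitCounts.getD "orange" 0 = 0 := rfl
  have i3 : pvInitCounts.getD "yellow" 0 = 0 := rfl
  have i4 : pvInitCounts.getD "white" 0 = 0 := rfl
  have i5 : pvInitCounts.getD "other" 0 = 0 := rfl
  simp only [i1, i2, i3, i4, i5, zero_add, PySem.List.count_eq]
  rw [pvCount_other]
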